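-- pv_equiv track=rewrite | github.com/skrul/thelist | thelist/show_parser.py | _find_at
-- ===== SOURCE A (Python) =====
-- def _find_at(s):
--     in_paren = False
--     looking_for = ' at '
--     looking_for_idx = 0
--     for i, c in enumerate(s):
--         if c == '(':
--             in_paren = True
--             looking_for_idx = 0
--             continue
--         if c == ')':
--             in_paren = False
--             looking_for_idx = 0
--             continue
--         if not in_paren:
--             c = c.lower()
--             if c == looking_for[looking_for_idx]:
--                 looking_for_idx += 1
--                 if looking_for_idx == len(looking_for):
--                     return i - len(looking_for) + 1
--             else:
--                 looking_for_idx = 0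
--                 if c == looking_for[looking_for_idx]:
--                     looking_for_idx += 1
--     return None
-- ===== SOURCE B (Python) =====
-- def _find_at(s):
--     in_paren = False
--     for i, c in enumerate(s):
--         if c == '(':
--             in_paren = True
--         elif c == ')':
--             in_paren = False
--         elif not in_paren and s[i:i+4].lower() == ' at ':
--             return i
--     return None
-- ===== Notes on version B (the rewrite author's own statement) =====
-- stated objective: simpler
-- what changed: A's incremental ' at '-matching state machine (looking_for_idx with hand-rolled mismatch reset) is replaced by a sliding-window comparison: at each position outside parentheses B simply compares the lowercased 4-character slice with ' at '.
import Mathlib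
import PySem

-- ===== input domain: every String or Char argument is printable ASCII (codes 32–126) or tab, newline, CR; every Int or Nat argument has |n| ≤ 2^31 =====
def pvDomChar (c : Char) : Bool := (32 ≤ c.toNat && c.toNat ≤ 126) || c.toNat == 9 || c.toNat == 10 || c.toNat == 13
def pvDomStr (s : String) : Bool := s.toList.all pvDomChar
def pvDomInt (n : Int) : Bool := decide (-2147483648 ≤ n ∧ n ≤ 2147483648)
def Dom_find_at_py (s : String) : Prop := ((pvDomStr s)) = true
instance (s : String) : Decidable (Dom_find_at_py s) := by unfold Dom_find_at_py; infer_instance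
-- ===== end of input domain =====

-- B replaces A's hand-rolled ' at '-matching state machine (looking_for_idx) by a
-- simple sliding-window substring comparison at each outside-paren position: simpler, same cost.

-- the pattern ' at ' as a list of characters
def pvPat : List Char := [' ', 'a', 't', ' ']

-- ===== PORT A =====
-- literal port of A's loop: state = (index i, in_paren, looking_for_idx)
def findAtAuxA : List Char → Int → Bool → Nat → Option Int
  | [], _, _, _ => none
  | c :: rest, i, inp, k =>
    if c = '(' then findAtAuxA rest (i + 1) true 0
    else if c = ')' then findAtAuxA rest (i + 1) false 0
    else if inp then findAtAuxA rest (i + 1) inp k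
    else
      if PySem.Chars.lowerChar c = pvPat.getD k ' ' then
        if k + 1 = 4 then some (i - 4 + 1)
        else findAtAuxA rest (i + 1) inp (k + 1)
      else
        if PySem.Chars.lowerChar c = pvPat.getD 0 ' ' then findAtAuxA rest (i + 1) inp 1
        else findAtAuxA rest (i + 1) inp 0

def find_at_py (s : String) : Option Int := findAtAuxA s.toList 0 false 0

-- ===== PORT B =====
-- port of Source B: at each outside-paren position compare the lowered 4-char window with ' at '
def findAtAuxB : List Char → Int → Bool → Option Int
  | [], _, _ => none
  | c :: rest, i, inp =>
    if c = '(' then findAtAuxB rest (i + 1) true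
    else if c = ')' then findAtAuxB rest (i + 1) false
    else if inp then findAtAuxB rest (i + 1) inp
    else if ((c :: rest).take 4).map PySem.Chars.lowerChar = pvPat then some i
    else findAtAuxB rest (i + 1) inp

def find_at_py_alt (s : String) : Option Int := findAtAuxB s.toList 0 false

-- ===== PRECONDITION & SPEC =====
def Spec_find_at_py (s : String) (out : Option Int) : Prop := out = find_at_py_alt s
instance (s : String) (out : Option Int) : Decidable (Spec_find_at_py s out) := by unfold Spec_find_at_py; infer_instance

-- ===== CLAIM (what is proved, stated in full; the proofs are below) =====
def Claim_equal_find_at_py : Prop := ∀ (s : String), Dom_find_at_py s → Spec_find_at_py s (find_at_py s)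

-- ===== LEMMAS AND PROOFS =====

theorem pvTake4 (c : Char) (l : List Char) : (c :: l).take 4 = c :: l.take 3 := rfl
theorem pvTake3 (c : Char) (l : List Char) : (c :: l).take 3 = c :: l.take 2 := rfl
theorem pvTake2 (c : Char) (l : List Char) : (c :: l).take 2 = c :: l.take 1 := rfl
theorem pvTake1 (c : Char) (l : List Char) : (c :: l).take 1 = [c] := rfl

set_option maxHeartbeats 1000000 in
-- Main invariant: A's automaton with pending prefix length k either completes that
-- pending match (returning i - k) or agrees with B's window scan from the same point.
theorem findAtAux_eq (l : List Char) : ∀ (i : Int) (inp : Bool) (k : Nat), k ≤ 3 →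
    findAtAuxA l i inp k =
      if inp = false ∧ 0 < k ∧ (l.take (4 - k)).map PySem.Chars.lowerChar = pvPat.drop k
      then some (i - k) else findAtAuxB l i inp := by
  induction l with
  | nil =>
    intro i inp k hk
    simp only [findAtAuxA, findAtAuxB]
    rw [if_neg (by
      rintro ⟨-, hk0, hdrop⟩
      have : (pvPat.drop k).length = 0 := by
        simpa using congrArg List.length hdrop.symm
      simp [pvPat] at this
      omega)]
  | cons c rest ih =>
    intro i inp k hk
    by_cases hl : c = '('
    · subst hl
      rw [if_neg (by
        rintro ⟨-, hk0, hdrop⟩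
        interval_cases k <;>
          · simp [pvPat] at hdrop
            first
              | exact absurd hdrop (by decide)
              | exact absurd hdrop.1 (by decide))]
      simp only [findAtAuxA, findAtAuxB, reduceIte]
      rw [ih (i + 1) true 0 (by omega)]
      simp
    · by_cases hr : c = ')'
      · subst hr
        rw [if_neg (by
          rintro ⟨-, hk0, hdrop⟩
          interval_cases k <;>
            · simp [pvPat] at hdrop
              first
                | exact absurd hdrop (by decide)
                | exact absurd hdrop.1 (by decide))]
        simp only [findAtAuxA, findAtAuxB, reduceIte]
        rw [ih (i + 1) false 0 (by omega)]
        simp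
      · cases inp with
        | true =>
          rw [if_neg (by rintro ⟨h, -⟩; exact absurd h (by decide))]
          simp only [findAtAuxA, findAtAuxB, if_neg hl, if_neg hr, reduceIte]
          rw [ih (i + 1) true k hk]
          simp
        | false =>
          simp only [findAtAuxA, findAtAuxB, if_neg hl, if_neg hr, Bool.false_eq_true,
            if_false]
          interval_cases k <;>
            · rw [ih (i + 1) false 0 (by omega), ih (i + 1) false 1 (by omega)]
              try rw [ih (i + 1) false 2 (by omega)]
              try rw [ih (i + 1) false 3 (by omega)]
              clear ih
              split_ifs <;>
                simp_all [pvPat, pvTake4, pvTake3, pvTake2, pvTake1] <;>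
                omega

-- ===== VERDICT (by name: the statement is the Claim_ definition above) =====
theorem find_at_py_spec : Claim_equal_find_at_py := by
  intro s _
  unfold Spec_find_at_py find_at_py find_at_py_alt
  rw [findAtAux_eq s.toList 0 false 0 (by omega)]
  simp
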